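-- pv_equiv track=rewrite | github.com/raesti/Python-Classification-Twitter | dictionary.py | muncul
-- ===== SOURCE A (Python) =====
-- def muncul(unik, dokumen):
--     a = 0
--     kemunculan = {}
--     for alpha in unik:
--         for value in dokumen:
--             for beta in value[1]:
--                 if alpha == beta:
--                     a += 1
--         kemunculan[alpha] = a
--         a = 0
--     return kemunculan
-- ===== SOURCE B (Python) =====
-- def muncul(unik, dokumen):
--     kemunculan = {alpha: 0 for alpha in unik}
--     for value in dokumen:
--         for beta in value[1]:
--             if beta in kemunculan:
--                 kemunculan[beta] += 1
--     return kemunculan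
-- ===== Notes on version B (the rewrite author's own statement) =====
-- stated objective: faster
-- what changed: Inverted the loop nesting: instead of one full scan of all documents per unique term, B pre-initializes the dict with all unik keys at 0 and makes a single pass over the documents' tokens, incrementing the bucket of each token found in the dict.
import Mathlib
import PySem

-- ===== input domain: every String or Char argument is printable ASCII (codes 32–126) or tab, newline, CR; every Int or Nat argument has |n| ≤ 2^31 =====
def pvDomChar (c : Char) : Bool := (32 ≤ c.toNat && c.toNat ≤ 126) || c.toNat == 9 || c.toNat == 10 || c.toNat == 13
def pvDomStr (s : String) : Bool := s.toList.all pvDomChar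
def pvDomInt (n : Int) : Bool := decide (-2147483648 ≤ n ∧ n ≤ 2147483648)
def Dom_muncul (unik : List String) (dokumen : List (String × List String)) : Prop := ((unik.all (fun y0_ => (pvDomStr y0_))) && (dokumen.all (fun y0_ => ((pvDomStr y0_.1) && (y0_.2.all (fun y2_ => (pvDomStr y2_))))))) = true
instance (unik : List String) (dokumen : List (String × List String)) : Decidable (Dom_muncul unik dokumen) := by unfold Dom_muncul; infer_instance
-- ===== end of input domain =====

-- B inverts A's loop nesting: one pass over the documents' tokens into a dict pre-initialized
-- from unik, instead of one full scan of all documents per unique term.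


-- ===== PORT A =====
def muncul (unik : List String) (dokumen : List (String × List String)) : List (String × Int) :=
  let st := unik.foldl (fun (st : PySem.Dict String Int × Int) alpha =>
      let a := dokumen.foldl (fun a value =>
          value.2.foldl (fun a beta => if alpha == beta then a + 1 else a) a) st.2
      (st.1.insert alpha a, 0)) (PySem.Dict.empty, 0)
  st.1.items

-- ===== PORT B =====
def muncul_alt (unik : List String) (dokumen : List (String × List String)) : List (String × Int) :=
  let kem : PySem.Dict String Int := unik.foldl (fun d alpha => d.insert alpha 0) PySem.Dict.empty
  let kem := dokumen.foldl (fun d value =>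
      value.2.foldl (fun d beta => if d.contains beta then d.modify beta 0 (· + 1) else d) d) kem
  kem.items

-- ===== PRECONDITION & SPEC =====
def Spec_muncul (unik : List String) (dokumen : List (String × List String)) (out : List (String × Int)) : Prop := out = muncul_alt unik dokumen
instance (unik : List String) (dokumen : List (String × List String)) (out : List (String × Int)) : Decidable (Spec_muncul unik dokumen out) := by unfold Spec_muncul; infer_instance

-- ===== CLAIM (what is proved, stated in full; the proofs are below) =====
def Claim_equal_muncul : Prop := ∀ (unik : List String) (dokumen : List (String × List String)), Dom_muncul unik dokumen → Spec_muncul unik dokumen (muncul unik dokumen)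

-- ===== LEMMAS AND PROOFS =====

-- total number of occurrences of α among all documents' tokens
def pvCnt (dokumen : List (String × List String)) (α : String) : Int :=
  ((dokumen.flatMap Prod.snd).countP (fun β => α == β) : Int)

-- A's inner two loops add pvCnt to the accumulator
theorem pvA_inner (dokumen : List (String × List String)) (α : String) (a : Int) :
    dokumen.foldl (fun a value =>
        value.2.foldl (fun a beta => if α == beta then a + 1 else a) a) a
      = a + pvCnt dokumen α := by
  induction dokumen generalizing a with
  | nil => simp [pvCnt]
  | cons v rest ih =>
      rw [List.foldl_cons, PySem.List.foldl_count_if, ih]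
      simp only [pvCnt, List.flatMap_cons, List.countP_append]
      push_cast
      ring

-- the outer loop with the inner count already summed out
theorem pvA_loop' (dokumen : List (String × List String)) (unik : List String)
    (d : PySem.Dict String Int) :
    (unik.foldl (fun (st : PySem.Dict String Int × Int) alpha =>
        (st.1.insert alpha (st.2 + pvCnt dokumen alpha), 0)) (d, 0)).1
      = unik.foldl (fun d α => d.insert α (pvCnt dokumen α)) d := by
  induction unik generalizing d with
  | nil => rfl
  | cons t rest ih =>
      simp only [List.foldl_cons, zero_add]
      exact ih (d.insert t (pvCnt dokumen t))

-- A's outer loop is a pure insert loop with key-determined values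
theorem pvA_loop (dokumen : List (String × List String)) (unik : List String)
    (d : PySem.Dict String Int) :
    (unik.foldl (fun (st : PySem.Dict String Int × Int) alpha =>
        let a := dokumen.foldl (fun a value =>
            value.2.foldl (fun a beta => if alpha == beta then a + 1 else a) a) st.2
        (st.1.insert alpha a, 0)) (d, 0)).1
      = unik.foldl (fun d α => d.insert α (pvCnt dokumen α)) d := by
  simp only [pvA_inner]
  exact pvA_loop' dokumen unik d

-- B's per-token step
def pvStepB (d : PySem.Dict String Int) (beta : String) : PySem.Dict String Int :=
  if d.contains beta then d.modify beta 0 (· + 1) else d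

theorem pvB_flatten (dokumen : List (String × List String)) (d : PySem.Dict String Int) :
    dokumen.foldl (fun d value => value.2.foldl pvStepB d) d
      = (dokumen.flatMap Prod.snd).foldl pvStepB d := by
  induction dokumen generalizing d with
  | nil => rfl
  | cons v rest ih => simp [List.foldl_cons, List.flatMap_cons, List.foldl_append, ih]

theorem pvStepB_keys (d : PySem.Dict String Int) (b : String) : (pvStepB d b).keys = d.keys := by
  unfold pvStepB
  split
  · rw [PySem.Dict.keys_modify, PySem.Dict.keys_insert_of_contains]
    assumption
  · rfl

theorem pvB_keys (l : List String) (d : PySem.Dict String Int) :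
    (l.foldl pvStepB d).keys = d.keys := by
  induction l generalizing d with
  | nil => rfl
  | cons b rest ih => rw [List.foldl_cons, ih, pvStepB_keys]

theorem pvStepB_contains (d : PySem.Dict String Int) (b k : String) :
    (pvStepB d b).contains k = d.contains k := by
  rw [PySem.Dict.contains_eq_decide_mem_keys, PySem.Dict.contains_eq_decide_mem_keys, pvStepB_keys]

theorem pvB_getD (l : List String) (d : PySem.Dict String Int) (k : String) :
    (l.foldl pvStepB d).getD k 0
      = d.getD k 0 + (if d.contains k then (l.count k : Int) else 0) := by
  induction l generalizing d with
  | nil => simp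
  | cons b rest ih =>
      rw [List.foldl_cons, ih, pvStepB_contains]
      unfold pvStepB
      by_cases hck : d.contains k = true
      · simp only [hck, if_true]
        by_cases hkb : k = b
        · subst hkb
          simp [hck]
          ring
        · split
          · rw [PySem.Dict.getD_modify]
            simp [Ne.symm hkb, hkb]
          · simp [Ne.symm hkb]
      · simp only [hck]
        by_cases hkb : k = b
        · subst hkb; simp [hck]
        · split <;> simp [PySem.Dict.getD_modify, hkb]

-- the value-insert loop: lookup afterwards
theorem pv_getD_insert_loop (f : String → Int) (unik : List String)
    (d : PySem.Dict String Int) (k : String) :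
    (unik.foldl (fun d α => d.insert α (f α)) d).getD k 0
      = if k ∈ unik then f k else d.getD k 0 := by
  induction unik generalizing d with
  | nil => simp
  | cons t rest ih =>
      rw [List.foldl_cons, ih]
      by_cases hkr : k ∈ rest
      · simp [hkr]
      · by_cases hkt : k = t
        · subst hkt; simp [hkr]
        · simp [hkr, hkt, PySem.Dict.getD_insert]

theorem pv_count_eq (l : List String) (k : String) :
    (l.countP (fun β => k == β) : Int) = (l.count k : Int) := by
  rw [List.count_eq_countP]
  congr 1
  apply List.countP_congr
  intro x _
  by_cases h : k = x
  · simp [h]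
  · simp [h, Ne.symm h]

-- ===== VERDICT (by name: the statement is the Claim_ definition above) =====
theorem muncul_spec : Claim_equal_muncul := by
  intro unik dokumen _
  show muncul unik dokumen = muncul_alt unik dokumen
  unfold muncul muncul_alt
  simp only [pvA_loop]
  have hstep : (fun (d : PySem.Dict String Int) beta =>
      if d.contains beta then d.modify beta 0 (· + 1) else d) = pvStepB := rfl
  simp only [hstep, pvB_flatten]
  -- keys of both sides
  have hkA : (unik.foldl (fun d α => d.insert α (pvCnt dokumen α)) PySem.Dict.empty).keys
      = PySem.Set.update (PySem.Dict.empty : PySem.Dict String Int).keys unik := PySem.Dict.keys_foldl_insert _ _ _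
  have hkB0 : (unik.foldl (fun d α => d.insert α (0 : Int)) PySem.Dict.empty).keys
      = PySem.Set.update (PySem.Dict.empty : PySem.Dict String Int).keys unik := PySem.Dict.keys_foldl_insert _ _ _
  have hkB : ((dokumen.flatMap Prod.snd).foldl pvStepB
      (unik.foldl (fun d α => d.insert α (0 : Int)) PySem.Dict.empty)).keys
      = PySem.Set.update (PySem.Dict.empty : PySem.Dict String Int).keys unik := by rw [pvB_keys, hkB0]
  have hndA : (unik.foldl (fun d α => d.insert α (pvCnt dokumen α)) PySem.Dict.empty).keys.Nodup :=
    PySem.Dict.nodup_keys_foldl_insert _ _ _ PySem.Dict.nodup_keys_empty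
  have hndB : ((dokumen.flatMap Prod.snd).foldl pvStepB
      (unik.foldl (fun d α => d.insert α (0 : Int)) PySem.Dict.empty)).keys.Nodup := by
    rw [hkB, ← hkA]; exact hndA
  rw [PySem.Dict.items_eq_map_keys _ hndA 0, PySem.Dict.items_eq_map_keys _ hndB 0, hkA, hkB]
  apply List.map_congr_left
  intro k hk
  have hkmem : k ∈ unik := by
    have := hk
    rw [PySem.Dict.keys_empty] at this
    simpa [PySem.Set.mem_update] using this
  have hA : (unik.foldl (fun d α => d.insert α (pvCnt dokumen α)) PySem.Dict.empty).getD k 0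
      = pvCnt dokumen k := by rw [pv_getD_insert_loop]; simp [hkmem]
  have hB0getD : (unik.foldl (fun d α => d.insert α (0 : Int)) PySem.Dict.empty).getD k 0 = 0 := by
    rw [pv_getD_insert_loop]; simp
  have hB0c : (unik.foldl (fun d α => d.insert α (0 : Int)) PySem.Dict.empty).contains k = true := by
    rw [PySem.Dict.contains_eq_decide_mem_keys, hkB0, PySem.Dict.keys_empty]
    simpa [PySem.Set.mem_update] using hkmem
  have hB : ((dokumen.flatMap Prod.snd).foldl pvStepB
      (unik.foldl (fun d α => d.insert α (0 : Int)) PySem.Dict.empty)).getD k 0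
      = pvCnt dokumen k := by
    rw [pvB_getD, hB0getD, hB0c]
    simp [pvCnt, pv_count_eq]
  rw [hA, hB]
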